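-- pv_equiv track=rewrite | github.com/doganzorlu/riskfabric | apps/backend/risk/services/resilience.py | _propagate_asset_failures_cached
-- ===== SOURCE A (Python) =====
-- from typing import Any, Dict, Iterable, List, Optional, Set, Tuple
--
-- def _propagate_asset_failures_cached(asset_ids: Iterable[int], dependency_map: Dict[int, Set[int]]) -> Set[int]:
--     """Propagate failures using a precomputed dependency map."""
--     failed: Set[int] = set(asset_ids)
--     frontier: List[int] = list(asset_ids)
--
--     while frontier:
--         current = frontier.pop()
--         for target_id in dependency_map.get(current, set()):
--             if target_id not in failed:
--                 failed.add(target_id)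
--                 frontier.append(target_id)
--
--     return failed
-- ===== SOURCE B (Python) =====
-- def _propagate_asset_failures_cached(asset_ids, dependency_map):
--     """Propagate failures by iterating to a fixpoint: each round takes the union of
--     all dependency targets of every currently-failed asset and subtracts what is
--     already failed; stop when a round discovers nothing new."""
--     failed = set(asset_ids)
--     while True:
--         fresh = {t for a in failed for t in dependency_map.get(a, set())} - failed
--         if not fresh:
--             return failed
--         failed |= fresh
-- ===== Notes on version B (the rewrite author's own statement) =====
-- stated objective: alternative
-- what changed: B replaces A's explicit worklist traversal (pop a node, test-and-push each unseen dependency target) by a worklist-free fixpoint iteration: each round recomputes the union of dependency targets of the whole current failed set with one set comprehension, subtracts the failed set, and repeats until a round adds nothing.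
import Mathlib
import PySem

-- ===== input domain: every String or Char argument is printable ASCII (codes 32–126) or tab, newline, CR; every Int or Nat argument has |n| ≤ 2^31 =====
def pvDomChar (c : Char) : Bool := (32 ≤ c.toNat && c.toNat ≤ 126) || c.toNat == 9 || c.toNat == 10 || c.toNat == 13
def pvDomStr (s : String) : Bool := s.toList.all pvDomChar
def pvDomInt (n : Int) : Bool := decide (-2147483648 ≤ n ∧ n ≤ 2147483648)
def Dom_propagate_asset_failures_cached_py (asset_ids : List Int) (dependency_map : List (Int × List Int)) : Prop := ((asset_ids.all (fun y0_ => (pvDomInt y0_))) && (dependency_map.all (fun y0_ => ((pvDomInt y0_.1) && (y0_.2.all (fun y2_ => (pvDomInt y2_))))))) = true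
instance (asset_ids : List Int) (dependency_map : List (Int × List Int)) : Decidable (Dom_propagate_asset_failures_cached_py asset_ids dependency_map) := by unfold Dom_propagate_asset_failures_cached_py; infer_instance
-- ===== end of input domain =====

-- B replaces A's worklist traversal (pop a node, test-and-push each unseen target) by a
-- worklist-free fixpoint iteration: each round recomputes the union of dependency targets of the
-- whole failed set and subtracts it, until a round adds nothing (objective: alternative).
-- Both Pythons return a set (unordered); each port returns that set's canonical sorted list of
-- distinct elements — Python set iteration order is not modelled and set outputs are compared as
-- finite sets.

-- ===== PORT A =====
-- pvFresh/pvVals/pvMaxV/pvD/pvD_lt/pvGetD_* are termination helpers cited by the ports'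
-- decreasing_by; they do not affect the computed value.
def pvFresh (failed : PySem.Set Int) : List Int → List Int
  | [] => []
  | t :: r =>
    if PySem.Set.contains failed t then pvFresh failed r
    else t :: pvFresh (PySem.Set.add failed t) r

def pvMaxV (dm : List (Int × List Int)) : Nat :=
  dm.foldr (fun kv m => max kv.2.length m) 0

def pvVals (dm : List (Int × List Int)) : List Int :=
  dm.flatMap (fun kv => kv.2)

def pvD (dm : List (Int × List Int)) (failed : PySem.Set Int) : Nat :=
  (pvVals dm).countP (fun x => !(PySem.Set.contains failed x))

lemma pv_contains_false (s : PySem.Set Int) (x : Int) :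
    PySem.Set.contains s x = false ↔ x ∉ s := by
  rw [← Bool.not_eq_true, PySem.Set.contains_iff]

def pvStepA (st : PySem.Set Int × List Int) (t : Int) : PySem.Set Int × List Int :=
  if PySem.Set.contains st.1 t then st else (PySem.Set.add st.1 t, st.2 ++ [t])

lemma pvFoldA (ts : List Int) (failed : PySem.Set Int) (rest : List Int) :
    ts.foldl pvStepA (failed, rest)
    = (failed ++ pvFresh failed ts, rest ++ pvFresh failed ts) := by
  induction ts generalizing failed rest with
  | nil => simp [pvFresh]
  | cons t r ih =>
    by_cases h : PySem.Set.contains failed t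
    · rw [List.foldl_cons, show pvStepA (failed, rest) t = (failed, rest) from by
        simp only [pvStepA, h, if_true], ih]
      simp only [pvFresh, h, if_true]
    · have hadd : PySem.Set.add failed t = failed ++ [t] := by
        simp only [PySem.Set.add, h, Bool.false_eq_true, if_false]
      rw [List.foldl_cons, show pvStepA (failed, rest) t
            = (PySem.Set.add failed t, rest ++ [t]) from by
        simp only [pvStepA, h, Bool.false_eq_true, if_false], ih]
      simp only [pvFresh, h, Bool.false_eq_true, if_false]
      simp [hadd, List.append_assoc]

lemma pvFresh_length_le (ts : List Int) (failed : PySem.Set Int) :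
    (pvFresh failed ts).length ≤ ts.length := by
  induction ts generalizing failed with
  | nil => simp [pvFresh]
  | cons t r ih =>
    by_cases h : PySem.Set.contains failed t
    · simp only [pvFresh, h, if_true]
      exact Nat.le_succ_of_le (ih failed)
    · simp only [pvFresh, h, Bool.false_eq_true, if_false, List.length_cons]
      exact Nat.succ_le_succ (ih _)

lemma mem_pvFresh (ts : List Int) (failed : PySem.Set Int) (x : Int)
    (hx : x ∈ pvFresh failed ts) : x ∈ ts ∧ PySem.Set.contains failed x = false := by
  induction ts generalizing failed with
  | nil => simp [pvFresh] at hx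
  | cons t r ih =>
    by_cases h : PySem.Set.contains failed t
    · simp only [pvFresh, h, if_true] at hx
      rcases ih failed hx with ⟨h1, h2⟩
      exact ⟨List.mem_cons_of_mem _ h1, h2⟩
    · simp only [pvFresh, h, Bool.false_eq_true, if_false, List.mem_cons] at hx
      rcases hx with rfl | hx
      · exact ⟨List.mem_cons_self, by simpa using h⟩
      · rcases ih _ hx with ⟨h1, h2⟩
        refine ⟨List.mem_cons_of_mem _ h1, ?_⟩
        rw [pv_contains_false] at h2 ⊢
        intro hmem
        exact h2 ((PySem.Set.mem_add failed t x).2 (Or.inl hmem))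

lemma pv_countP_lt (U : List Int) (p q : Int → Bool)
    (hpq : ∀ x, q x = true → p x = true) (a : Int) (ha : a ∈ U)
    (hpa : p a = true) (hqa : q a = false) : U.countP q < U.countP p := by
  induction U with
  | nil => simp at ha
  | cons u r ih =>
    have hmono : r.countP q ≤ r.countP p := by
      apply List.countP_mono_left
      intro x _ hx; exact hpq x hx
    rcases List.mem_cons.1 ha with rfl | ha'
    · simp [hpa, hqa]; omega
    · have := ih ha'
      simp only [List.countP_cons]
      by_cases hq : q u = true
      · simp [hq, hpq u hq]; omega
      · simp [hq]; split <;> omega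

lemma pvMaxV_mem (dm : List (Int × List Int)) (kv : Int × List Int) (h : kv ∈ dm) :
    kv.2.length ≤ pvMaxV dm := by
  induction dm with
  | nil => simp at h
  | cons p r ih =>
    rcases List.mem_cons.1 h with rfl | h'
    · simp [pvMaxV]
    · simp only [pvMaxV, List.foldr_cons]
      exact le_trans (ih h') (le_max_right _ _)

lemma pvGetD_cases (dm : List (Int × List Int)) (c : Int) :
    PySem.Dict.getD ⟨dm⟩ c ([] : List Int) = [] ∨
      ∃ kv ∈ dm, PySem.Dict.getD ⟨dm⟩ c ([] : List Int) = kv.2 := by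
  simp only [PySem.Dict.getD, PySem.Dict.get?]
  cases h : List.find? (fun p => p.1 == c) (PySem.Dict.items ⟨dm⟩) with
  | none => simp
  | some kv =>
    right
    exact ⟨kv, List.mem_of_find?_eq_some h, by simp⟩

lemma pvGetD_len_le (dm : List (Int × List Int)) (c : Int) :
    (PySem.Dict.getD ⟨dm⟩ c ([] : List Int)).length ≤ pvMaxV dm := by
  rcases pvGetD_cases dm c with h | ⟨kv, hmem, h⟩
  · simp [h]
  · rw [h]; exact pvMaxV_mem dm kv hmem

lemma pvGetD_sub (dm : List (Int × List Int)) (c : Int) (x : Int)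
    (hx : x ∈ PySem.Dict.getD ⟨dm⟩ c ([] : List Int)) : x ∈ pvVals dm := by
  rcases pvGetD_cases dm c with h | ⟨kv, hmem, h⟩
  · rw [h] at hx; simp at hx
  · rw [h] at hx
    exact List.mem_flatMap.2 ⟨kv, hmem, hx⟩

lemma pvD_lt (dm : List (Int × List Int)) (failed failed' : PySem.Set Int) (f : Int)
    (hsub : ∀ x ∈ failed, x ∈ failed') (hf' : f ∈ failed')
    (hfU : f ∈ pvVals dm) (hfnew : PySem.Set.contains failed f = false) :
    pvD dm failed' < pvD dm failed := by
  apply pv_countP_lt _ _ _ ?_ f hfU (by simpa using hfnew)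
  · simp only [Bool.not_eq_false']
    exact (PySem.Set.contains_iff _ _).2 hf'
  · intro x hx
    simp only [Bool.not_eq_true', pv_contains_false] at hx ⊢
    intro hmem; exact hx (hsub x hmem)

def pvRunA (dm : List (Int × List Int)) (failed : PySem.Set Int)
    (frontier : List Int) : List Int :=
  if h : frontier = [] then failed
  else
    let current := frontier.getLast h
    let st := (PySem.Dict.getD ⟨dm⟩ current ([] : List Int)).foldl pvStepA
                (failed, frontier.dropLast)
    pvRunA dm st.1 st.2
termination_by (pvMaxV dm + 2) * pvD dm failed + frontier.length
decreasing_by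
  rw [pvFoldA]
  cases hf : pvFresh failed (PySem.Dict.getD ⟨dm⟩ (frontier.getLast h) ([] : List Int)) with
  | nil =>
    simp only [List.append_nil]
    have hlen : frontier.dropLast.length < frontier.length := by
      have := List.length_pos_iff.2 h
      simp [List.length_dropLast]; omega
    omega
  | cons f fr =>
    dsimp only
    have hmem : f ∈ pvFresh failed (PySem.Dict.getD ⟨dm⟩ (frontier.getLast h) ([] : List Int)) := by
      rw [hf]; exact List.mem_cons_self
    rcases mem_pvFresh _ _ _ hmem with ⟨hts, hnew⟩
    have hD : pvD dm (failed ++ (f :: fr)) < pvD dm failed :=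
      pvD_lt dm failed (failed ++ (f :: fr)) f (fun x hx => List.mem_append_left _ hx)
        (List.mem_append_right _ List.mem_cons_self) (pvGetD_sub dm _ f hts) hnew
    have hfl : (f :: fr).length ≤ pvMaxV dm := by
      rw [← hf]
      exact le_trans (pvFresh_length_le _ _) (pvGetD_len_le dm _)
    have hdl : frontier.dropLast.length + 1 = frontier.length := by
      have := List.length_pos_iff.2 h
      simp [List.length_dropLast]; omega
    have hmul : (pvMaxV dm + 2) * (pvD dm (failed ++ (f :: fr)) + 1)
        ≤ (pvMaxV dm + 2) * pvD dm failed := Nat.mul_le_mul_left _ hD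
    rw [Nat.mul_add, Nat.mul_one] at hmul
    simp only [List.length_append]
    omega

-- _propagate_asset_failures_cached (A): failed = set(asset_ids); frontier = list(asset_ids);
-- while frontier: current = frontier.pop(); for t in dep.get(current, set()): if t not in failed:
-- add+push; return failed (a set — returned as its canonical sorted element list).
def propagate_asset_failures_cached_py (asset_ids : List Int) (dependency_map : List (Int × List Int)) : List Int :=
  PySem.List.sorted (pvRunA dependency_map (PySem.Set.ofList asset_ids) asset_ids) (fun x => x) false

-- ===== PORT B =====
-- fresh = {t for a in failed for t in dependency_map.get(a, set())} - failed
def pvFreshB (dm : List (Int × List Int)) (failed : PySem.Set Int) : PySem.Set Int :=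
  PySem.Set.diff
    (PySem.Set.ofList (failed.flatMap (fun a => PySem.Dict.getD ⟨dm⟩ a ([] : List Int))))
    failed

def pvRunFix (dm : List (Int × List Int)) (failed : PySem.Set Int) : List Int :=
  let fresh := pvFreshB dm failed
  if fresh = [] then failed
  else pvRunFix dm (PySem.Set.union failed fresh)
termination_by pvD dm failed
decreasing_by
  rcases List.exists_mem_of_ne_nil _
      (show pvFreshB dm failed ≠ [] from ‹¬ (fresh = [])›) with ⟨f, hmemf⟩
  have hd := (PySem.Set.mem_diff _ _ _).1 hmemf
  have hof := (PySem.Set.mem_ofList _ _).1 hd.1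
  rcases List.mem_flatMap.1 hof with ⟨a, _, hfa⟩
  exact pvD_lt dm failed (PySem.Set.union failed (pvFreshB dm failed)) f
      (fun x hx => (PySem.Set.mem_union _ _ _).2 (Or.inl hx))
      ((PySem.Set.mem_union _ _ _).2 (Or.inr hmemf))
      (pvGetD_sub dm a f hfa) ((pv_contains_false _ _).2 hd.2)


-- B: failed = set(asset_ids); loop: fresh = {targets of failed} - failed; stop when empty,
-- else failed |= fresh; return failed (a set — returned as its canonical sorted element list).
def propagate_asset_failures_cached_py_alt (asset_ids : List Int) (dependency_map : List (Int × List Int)) : List Int :=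
  PySem.List.sorted (pvRunFix dependency_map (PySem.Set.ofList asset_ids)) (fun x => x) false

-- ===== PRECONDITION & SPEC =====
def Spec_propagate_asset_failures_cached_py (asset_ids : List Int) (dependency_map : List (Int × List Int)) (out : List Int) : Prop := out = propagate_asset_failures_cached_py_alt asset_ids dependency_map
instance (asset_ids : List Int) (dependency_map : List (Int × List Int)) (out : List Int) : Decidable (Spec_propagate_asset_failures_cached_py asset_ids dependency_map out) := by unfold Spec_propagate_asset_failures_cached_py; infer_instance

-- ===== CLAIM (what is proved, stated in full; the proofs are below) =====
def Claim_equal_propagate_asset_failures_cached_py : Prop := ∀ (asset_ids : List Int) (dependency_map : List (Int × List Int)), Dom_propagate_asset_failures_cached_py asset_ids dependency_map → Spec_propagate_asset_failures_cached_py asset_ids dependency_map (propagate_asset_failures_cached_py asset_ids dependency_map)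

-- ===== LEMMAS AND PROOFS =====
-- the edge relation of the dependency map, and reachability from the initial ids
def pvEdge (dm : List (Int × List Int)) (u v : Int) : Prop :=
  v ∈ PySem.Dict.getD ⟨dm⟩ u ([] : List Int)

def pvReach (dm : List (Int × List Int)) (ids : List Int) (x : Int) : Prop :=
  ∃ s ∈ ids, Relation.ReflTransGen (pvEdge dm) s x

lemma pvFresh_cover (ts : List Int) (failed : PySem.Set Int) (t : Int) (ht : t ∈ ts) :
    t ∈ failed ∨ t ∈ pvFresh failed ts := by
  induction ts generalizing failed with
  | nil => simp at ht
  | cons a r ih =>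
    by_cases h : PySem.Set.contains failed a
    · simp only [pvFresh, h, if_true]
      rcases List.mem_cons.1 ht with rfl | ht'
      · exact Or.inl ((PySem.Set.contains_iff _ _).1 h)
      · exact ih failed ht'
    · simp only [pvFresh, h, Bool.false_eq_true, if_false]
      rcases List.mem_cons.1 ht with rfl | ht'
      · exact Or.inr List.mem_cons_self
      · rcases ih (PySem.Set.add failed a) ht' with hm | hm
        · rcases (PySem.Set.mem_add failed a t).1 hm with hm' | rfl
          · exact Or.inl hm'
          · exact Or.inr List.mem_cons_self
        · exact Or.inr (List.mem_cons_of_mem _ hm)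

lemma pvFresh_nodup (ts : List Int) (failed : PySem.Set Int) :
    (pvFresh failed ts).Nodup := by
  induction ts generalizing failed with
  | nil => simp [pvFresh]
  | cons t r ih =>
    by_cases h : PySem.Set.contains failed t
    · simp only [pvFresh, h, if_true]; exact ih failed
    · simp only [pvFresh, h, Bool.false_eq_true, if_false]
      refine List.nodup_cons.2 ⟨?_, ih _⟩
      intro hmem
      have := (mem_pvFresh _ _ _ hmem).2
      rw [pv_contains_false] at this
      exact this ((PySem.Set.mem_add failed t t).2 (Or.inr rfl))

lemma pvRunA_nodup (dm : List (Int × List Int)) (failed : PySem.Set Int)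
    (frontier : List Int) (hnd : failed.Nodup) : (pvRunA dm failed frontier).Nodup := by
  induction failed, frontier using pvRunA.induct dm with
  | case1 failed => rwa [pvRunA, dif_pos rfl]
  | case2 failed frontier h current st ih =>
    rw [pvRunA, dif_neg h]
    apply ih
    show (((PySem.Dict.getD ⟨dm⟩ (frontier.getLast h) ([] : List Int)).foldl pvStepA
      (failed, frontier.dropLast)).1).Nodup
    rw [pvFoldA]
    refine List.Nodup.append hnd (pvFresh_nodup _ _) ?_
    intro a ha hmem
    have := (mem_pvFresh _ _ _ hmem).2
    rw [pv_contains_false] at this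
    exact this ha

-- if every processed node's targets are already failed, a path from a failed node either stays
-- inside failed or passes through the frontier
lemma pvEscape (dm : List (Int × List Int)) (failed frontier : List Int)
    (hclosed : ∀ u ∈ failed, u ∉ frontier → ∀ v, pvEdge dm u v → v ∈ failed)
    (x v : Int) (hpath : Relation.ReflTransGen (pvEdge dm) v x) (hv : v ∈ failed) :
    x ∈ failed ∨ ∃ u ∈ frontier, Relation.ReflTransGen (pvEdge dm) u x := by
  induction hpath using Relation.ReflTransGen.head_induction_on with
  | refl => exact Or.inl hv
  | @head a c hedge hpath' ih =>
    by_cases hfr : a ∈ frontier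
    · exact Or.inr ⟨a, hfr, Relation.ReflTransGen.head hedge hpath'⟩
    · exact ih (hclosed a hv hfr c hedge)

theorem pvRunA_mem (dm : List (Int × List Int)) (failed : PySem.Set Int)
    (frontier : List Int) :
    (∀ u ∈ frontier, u ∈ failed) →
    (∀ u ∈ failed, u ∉ frontier → ∀ v, pvEdge dm u v → v ∈ failed) →
    ∀ x, (x ∈ pvRunA dm failed frontier ↔
      x ∈ failed ∨ ∃ u ∈ frontier, Relation.ReflTransGen (pvEdge dm) u x) := by
  induction failed, frontier using pvRunA.induct dm with
  | case1 failed =>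
    intro _ _ x
    rw [pvRunA, dif_pos rfl]
    simp
  | case2 failed frontier h current st ih =>
    intro hsub hclosed x
    have hfr : frontier = frontier.dropLast ++ [frontier.getLast h] :=
      (List.dropLast_append_getLast h).symm
    have hcmem : frontier.getLast h ∈ frontier := List.getLast_mem h
    rw [pvRunA, dif_neg h]
    show x ∈ pvRunA dm
        (((PySem.Dict.getD ⟨dm⟩ (frontier.getLast h) ([] : List Int)).foldl pvStepA
          (failed, frontier.dropLast)).1)
        (((PySem.Dict.getD ⟨dm⟩ (frontier.getLast h) ([] : List Int)).foldl pvStepA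
          (failed, frontier.dropLast)).2) ↔ _
    have hfold := pvFoldA (PySem.Dict.getD ⟨dm⟩ (frontier.getLast h) ([] : List Int))
      failed frontier.dropLast
    set F := pvFresh failed (PySem.Dict.getD ⟨dm⟩ (frontier.getLast h) ([] : List Int)) with hF
    rw [hfold]
    dsimp only
    have hst : st = (failed ++ F, frontier.dropLast ++ F) := hfold
    rw [hst] at ih
    dsimp only at ih
    have hsub' : ∀ u ∈ frontier.dropLast ++ F, u ∈ failed ++ F := by
      intro u hu
      rcases List.mem_append.1 hu with hu | hu
      · exact List.mem_append_left _ (hsub u (List.mem_of_mem_dropLast hu))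
      · exact List.mem_append_right _ hu
    have hclosed' : ∀ u ∈ failed ++ F, u ∉ frontier.dropLast ++ F →
        ∀ v, pvEdge dm u v → v ∈ failed ++ F := by
      intro u hu hnot v hedge
      rcases List.mem_append.1 hu with hu | hu
      · by_cases hc : u = frontier.getLast h
        · subst hc
          rcases pvFresh_cover _ failed v hedge with hv | hv
          · exact List.mem_append_left _ hv
          · exact List.mem_append_right _ hv
        · have hunf : u ∉ frontier := by
            rw [hfr]
            intro hm
            rcases List.mem_append.1 hm with hm | hm
            · exact hnot (List.mem_append_left _ hm)
            · exact hc (by simpa using hm)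
          exact List.mem_append_left _ (hclosed u hu hunf v hedge)
      · exact absurd (List.mem_append_right _ hu) hnot
    rw [ih hsub' hclosed' x]
    constructor
    · rintro (hx | ⟨u, hu, hpath⟩)
      · rcases List.mem_append.1 hx with hx | hx
        · exact Or.inl hx
        · refine Or.inr ⟨frontier.getLast h, hcmem, ?_⟩
          exact Relation.ReflTransGen.single (mem_pvFresh _ _ _ hx).1
      · rcases List.mem_append.1 hu with hu | hu
        · exact Or.inr ⟨u, List.mem_of_mem_dropLast hu, hpath⟩
        · refine Or.inr ⟨frontier.getLast h, hcmem, ?_⟩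
          exact Relation.ReflTransGen.head (mem_pvFresh _ _ _ hu).1 hpath
    · rintro (hx | ⟨u, hu, hpath⟩)
      · exact Or.inl (List.mem_append_left _ hx)
      · rcases List.mem_append.1 (hfr ▸ hu) with hu' | hu'
        · exact Or.inr ⟨u, List.mem_append_left _ hu', hpath⟩
        · have hu'' : u = frontier.getLast h := by simpa using hu'
          exact pvEscape dm (failed ++ F) (frontier.dropLast ++ F) hclosed' x
            (frontier.getLast h) (hu'' ▸ hpath)
            (List.mem_append_left _ (hsub _ hcmem))

lemma pvRunFix_nodup (dm : List (Int × List Int)) (failed : PySem.Set Int)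
    (hnd : failed.Nodup) : (pvRunFix dm failed).Nodup := by
  induction failed using pvRunFix.induct dm with
  | case1 failed fresh hnil => rwa [pvRunFix, if_pos hnil]
  | case2 failed fresh hnil ih =>
    rw [pvRunFix, if_neg hnil]
    exact ih (PySem.Set.nodup_union _ _ hnd)

lemma pvRunFix_mono (dm : List (Int × List Int)) (failed : PySem.Set Int) :
    ∀ x ∈ failed, x ∈ pvRunFix dm failed := by
  induction failed using pvRunFix.induct dm with
  | case1 failed fresh hnil =>
    intro x hx; rwa [pvRunFix, if_pos hnil]
  | case2 failed fresh hnil ih =>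
    intro x hx
    rw [pvRunFix, if_neg hnil]
    exact ih x ((PySem.Set.mem_union _ _ _).2 (Or.inl hx))

lemma pvRunFix_closed (dm : List (Int × List Int)) (failed : PySem.Set Int) :
    ∀ a ∈ pvRunFix dm failed, ∀ v, pvEdge dm a v → v ∈ pvRunFix dm failed := by
  induction failed using pvRunFix.induct dm with
  | case1 failed fresh hnil =>
    intro a ha v hedge
    rw [pvRunFix, if_pos hnil] at ha ⊢
    by_contra hv
    have hof : v ∈ PySem.Set.ofList (failed.flatMap
        (fun a => PySem.Dict.getD ⟨dm⟩ a ([] : List Int))) :=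
      (PySem.Set.mem_ofList _ _).2 (List.mem_flatMap.2 ⟨a, ha, hedge⟩)
    have : v ∈ pvFreshB dm failed := (PySem.Set.mem_diff _ _ _).2 ⟨hof, hv⟩
    rw [show pvFreshB dm failed = [] from hnil] at this
    simp at this
  | case2 failed fresh hnil ih =>
    intro a ha v hedge
    rw [pvRunFix, if_neg hnil] at ha ⊢
    exact ih a ha v hedge

lemma pvRunFix_mem (dm : List (Int × List Int)) (ids : List Int) (x : Int) :
    x ∈ pvRunFix dm (PySem.Set.ofList ids) ↔ pvReach dm ids x := by
  constructor
  · -- everything in the result is reachable: induction over the fixpoint loop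
    have key : ∀ failed : PySem.Set Int, (∀ y ∈ failed, pvReach dm ids y) →
        ∀ y ∈ pvRunFix dm failed, pvReach dm ids y := by
      intro failed
      induction failed using pvRunFix.induct dm with
      | case1 failed fresh hnil =>
        intro hf y hy
        rw [pvRunFix, if_pos hnil] at hy
        exact hf y hy
      | case2 failed fresh hnil ih =>
        intro hf y hy
        rw [pvRunFix, if_neg hnil] at hy
        refine ih ?_ y hy
        intro z hz
        rcases (PySem.Set.mem_union _ _ _).1 hz with hz | hz
        · exact hf z hz
        · have hd := (PySem.Set.mem_diff _ _ _).1 hz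
          rcases List.mem_flatMap.1 ((PySem.Set.mem_ofList _ _).1 hd.1) with ⟨a, ha, hedge⟩
          rcases hf a ha with ⟨s, hs, hpath⟩
          exact ⟨s, hs, Relation.ReflTransGen.tail hpath hedge⟩
    intro hx
    refine key _ ?_ x hx
    intro y hy
    exact ⟨y, (PySem.Set.mem_ofList _ _).1 hy, Relation.ReflTransGen.refl⟩
  · -- every reachable node is in the result: the result contains ids and is edge-closed
    rintro ⟨s, hs, hpath⟩
    induction hpath with
    | refl => exact pvRunFix_mono dm _ s ((PySem.Set.mem_ofList _ _).2 hs)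
    | tail _ hedge ih => exact pvRunFix_closed dm _ _ ih _ hedge

lemma pvRunA_mem_reach (dm : List (Int × List Int)) (ids : List Int) (x : Int) :
    x ∈ pvRunA dm (PySem.Set.ofList ids) ids ↔ pvReach dm ids x := by
  rw [pvRunA_mem dm (PySem.Set.ofList ids) ids
    (fun u hu => (PySem.Set.mem_ofList _ _).2 hu)
    (fun u hu hnot _ _ => absurd ((PySem.Set.mem_ofList _ _).1 hu) hnot) x]
  constructor
  · rintro (hx | ⟨u, hu, hpath⟩)
    · exact ⟨x, (PySem.Set.mem_ofList _ _).1 hx, Relation.ReflTransGen.refl⟩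
    · exact ⟨u, hu, hpath⟩
  · rintro ⟨s, hs, hpath⟩
    exact Or.inr ⟨s, hs, hpath⟩

-- ===== VERDICT (by name: the statement is the Claim_ definition above) =====
theorem propagate_asset_failures_cached_py_spec : Claim_equal_propagate_asset_failures_cached_py := by
  intro asset_ids dependency_map _
  show propagate_asset_failures_cached_py asset_ids dependency_map
      = propagate_asset_failures_cached_py_alt asset_ids dependency_map
  unfold propagate_asset_failures_cached_py propagate_asset_failures_cached_py_alt
  apply PySem.List.sorted_eq_sorted_of_perm _ _ _ (fun a b h => h)
  refine (List.perm_ext_iff_of_nodup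
    (pvRunA_nodup _ _ _ (PySem.Set.nodup_ofList _))
    (pvRunFix_nodup _ _ (PySem.Set.nodup_ofList _))).2 ?_
  intro a
  rw [pvRunA_mem_reach, pvRunFix_mem]
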